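-- pv_equiv track=rewrite | github.com/IECS/MansOS | tools/web/moteconfig.py | isValidFatFilename
-- ===== SOURCE A (Python) =====
-- def isFatCharacterAcceptable(c):
--     if c.isalnum(): return True
--     if c == ' ': return True
--     if c >= 128: return True
--     if c == '!' or c == '#' \
--             or c == '$' or c == '%' \
--             or c == '&' or c == '\'' \
--             or c == '(' or c == ')' \
--             or c == '-' or c == '@' \
--             or c == '^' or c == '_' \
--             or c == '`' or c == '{' \
--             or c == '}' or c == '~':
--         return True
--     return False
--
-- def isValidFatFilename(filename):
--     baseLen = 0
--     extLen = 0
--     numDots = 0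
--     for c in filename:
--         if c == '.' and numDots == 0:
--             numDots += 1
--             continue
--
--         if numDots == 0:
--             baseLen += 1
--         else:
--             extLen += 1
--
--         if not isFatCharacterAcceptable(c):
--             return False
--
--     return baseLen >= 1 and baseLen <= 8 and extLen <= 3
-- ===== SOURCE B (Python) =====
-- def isFatCharacterAcceptable(c):
--     if c.isalnum(): return True
--     if c == ' ': return True
--     if c >= 128: return True
--     if c == '!' or c == '#' \
--             or c == '$' or c == '%' \
--             or c == '&' or c == '\'' \
--             or c == '(' or c == ')' \
--             or c == '-' or c == '@' \
--             or c == '^' or c == '_' \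
--             or c == '`' or c == '{' \
--             or c == '}' or c == '~':
--         return True
--     return False
--
-- def isValidFatFilename(filename):
--     base, _sep, ext = filename.partition('.')
--     return (all(isFatCharacterAcceptable(c) for c in base + ext)
--             and 1 <= len(base) <= 8 and len(ext) <= 3)
-- ===== Notes on version B (the rewrite author's own statement) =====
-- stated objective: idiomatic
-- what changed: Replaces the single stateful counting loop (three counters baseLen/extLen/numDots with continue and early return) by str.partition('.') into base/ext, an all() character check over base+ext, and direct len() comparisons; the helper is kept unchanged.
import Mathlib
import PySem

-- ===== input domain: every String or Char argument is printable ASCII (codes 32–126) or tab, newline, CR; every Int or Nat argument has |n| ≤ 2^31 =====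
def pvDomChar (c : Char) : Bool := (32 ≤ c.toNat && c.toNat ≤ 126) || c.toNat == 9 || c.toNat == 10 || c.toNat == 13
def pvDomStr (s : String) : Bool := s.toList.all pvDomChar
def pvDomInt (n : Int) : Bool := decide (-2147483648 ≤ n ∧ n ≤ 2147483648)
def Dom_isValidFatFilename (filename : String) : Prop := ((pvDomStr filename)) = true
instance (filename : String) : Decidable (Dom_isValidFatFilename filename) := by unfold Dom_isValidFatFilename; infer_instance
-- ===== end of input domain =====

-- B replaces A's stateful counting loop (three counters, continue, early return) by a
-- partition-into-base/ext decomposition with an all() character check (idiomatic, same cost);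
-- equivalence is claimed on Pre_, the inputs where the Pythons return (elsewhere both raise TypeError).

-- ===== PORT A =====
-- helper isFatCharacterAcceptable: after the isalnum and ' ' tests the Python evaluates
-- 'c >= 128', a str/int comparison that raises TypeError in Python 3; Pre_ excludes every
-- input on which this point is reached, so the port returns false there.
def pvAcceptableA (c : Char) : Bool :=
  if PySem.Chars.isalnum c then true
  else if c = ' ' then true
  else false

def pvLoopA : List Char → Int → Int → Int → Bool
  | [], baseLen, extLen, _ =>
      decide (baseLen ≥ 1) && decide (baseLen ≤ 8) && decide (extLen ≤ 3)
  | c :: rest, baseLen, extLen, numDots =>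
      if c = '.' ∧ numDots = 0 then pvLoopA rest baseLen extLen (numDots + 1)
      else
        let baseLen' := if numDots = 0 then baseLen + 1 else baseLen
        let extLen'  := if numDots = 0 then extLen else extLen + 1
        if !(pvAcceptableA c) then false
        else pvLoopA rest baseLen' extLen' numDots

def isValidFatFilename (filename : String) : Bool :=
  pvLoopA filename.toList 0 0 0

-- ===== PORT B =====
-- B keeps A's helper isFatCharacterAcceptable verbatim; as on the A side, its 'c >= 128'
-- str/int comparison raises TypeError in Python 3 and Pre_ excludes every input reaching it,
-- so the port returns false there.
def pvAcceptableB (c : Char) : Bool :=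
  if PySem.Chars.isalnum c then true
  else if c = ' ' then true
  else false

def isValidFatFilename_alt (filename : String) : Bool :=
  -- str.partition('.'): base = before the first '.', ext = after it ("" if no dot)
  let l := filename.toList
  let base := l.takeWhile (· ≠ '.')
  let ext  := (l.dropWhile (· ≠ '.')).drop 1
  (base ++ ext).all pvAcceptableB
    && (decide (1 ≤ base.length) && decide (base.length ≤ 8))
    && decide (ext.length ≤ 3)

-- ===== PRECONDITION & SPEC =====
-- the characters A's loop actually checks: the filename minus its first '.'
def pvChecked (filename : String) : List Char :=
  filename.toList.takeWhile (· ≠ '.') ++ (filename.toList.dropWhile (· ≠ '.')).drop 1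
def pvOkChar (c : Char) : Bool := PySem.Chars.isalnum c || c = ' '
-- Pre_ excludes exactly the inputs where both Pythons raise TypeError ('c >= 128' str/int
-- comparison in the helper): any filename whose characters other than the first '.' are not
-- all alphanumeric-or-space.
def Pre_isValidFatFilename (filename : String) : Prop :=
  ((pvChecked filename).all pvOkChar) = true
instance (filename : String) : Decidable (Pre_isValidFatFilename filename) := by
  unfold Pre_isValidFatFilename; infer_instance
def pvWitness_isValidFatFilename : String := "abc.txt"


def Spec_isValidFatFilename (filename : String) (out : Bool) : Prop := out = isValidFatFilename_alt filename
instance (filename : String) (out : Bool) : Decidable (Spec_isValidFatFilename filename out) := by unfold Spec_isValidFatFilename; infer_instance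

-- ===== CLAIM (what is proved, stated in full; the proofs are below) =====
def Claim_equal_isValidFatFilename : Prop := ∀ (filename : String), Dom_isValidFatFilename filename → Pre_isValidFatFilename filename → Spec_isValidFatFilename filename (isValidFatFilename filename)

-- ===== LEMMAS AND PROOFS =====
theorem pvAcceptableA_of_ok {c : Char} (h : pvOkChar c = true) : pvAcceptableA c = true := by
  simp [pvOkChar] at h
  rcases h with h | h <;> simp [pvAcceptableA, h]

theorem pvAcceptableB_of_ok {c : Char} (h : pvOkChar c = true) : pvAcceptableB c = true := by
  simp [pvOkChar] at h
  rcases h with h | h <;> simp [pvAcceptableB, h]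

theorem pvLoopA_ext (l : List Char) (b e : Int) (h : ∀ c ∈ l, pvOkChar c = true) :
    pvLoopA l b e 1 =
      (decide (b ≥ 1) && decide (b ≤ 8) && decide (e + (l.length : Int) ≤ 3)) := by
  induction l generalizing e with
  | nil => simp [pvLoopA]
  | cons c rest ih =>
    have hc : pvOkChar c = true := h c (by simp)
    have hrest : ∀ x ∈ rest, pvOkChar x = true := fun x hx => h x (by simp [hx])
    simp only [pvLoopA, pvAcceptableA_of_ok hc]
    rw [if_neg (by simp), if_neg (by simp)]
    norm_num
    rw [ih (e + 1) hrest]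
    congr 1
    rw [decide_eq_decide]
    omega

theorem pvLoopA_base (l : List Char) (b e : Int)
    (h : ∀ c ∈ l.takeWhile (· ≠ '.') ++ (l.dropWhile (· ≠ '.')).drop 1, pvOkChar c = true) :
    pvLoopA l b e 0 =
      (decide (b + ((l.takeWhile (· ≠ '.')).length : Int) ≥ 1)
        && decide (b + ((l.takeWhile (· ≠ '.')).length : Int) ≤ 8)
        && decide (e + (((l.dropWhile (· ≠ '.')).drop 1).length : Int) ≤ 3)) := by
  induction l generalizing b with
  | nil => simp [pvLoopA]
  | cons c rest ih =>
    by_cases hdot : c = '.'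
    · subst hdot
      have hrest : ∀ x ∈ rest, pvOkChar x = true := by
        intro x hx; exact h x (by simp [List.takeWhile, List.dropWhile, hx])
      have hstep : pvLoopA ('.' :: rest) b e 0 = pvLoopA rest b e 1 := by
        simp [pvLoopA]
      rw [hstep, pvLoopA_ext rest b e hrest]
      simp [List.takeWhile, List.dropWhile]
    · have htw : (c :: rest).takeWhile (· ≠ '.') = c :: rest.takeWhile (· ≠ '.') := by
        simp [List.takeWhile, hdot]
      have hdw : (c :: rest).dropWhile (· ≠ '.') = rest.dropWhile (· ≠ '.') := by
        simp [List.dropWhile, hdot]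
      have hc : pvOkChar c = true := h c (by rw [htw]; simp)
      have hrest : ∀ x ∈ rest.takeWhile (· ≠ '.') ++ (rest.dropWhile (· ≠ '.')).drop 1,
          pvOkChar x = true := by
        intro x hx; apply h; rw [htw, hdw]
        rcases List.mem_append.mp hx with hx | hx
        · exact List.mem_append.mpr (Or.inl (List.mem_cons_of_mem _ hx))
        · exact List.mem_append.mpr (Or.inr hx)
      have hstep : pvLoopA (c :: rest) b e 0 = pvLoopA rest (b + 1) e 0 := by
        simp [pvLoopA, hdot, pvAcceptableA_of_ok hc]
      rw [hstep, ih (b + 1) hrest, htw, hdw]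
      simp only [List.length_cons]
      congr 2 <;> rw [decide_eq_decide] <;> push_cast <;> omega

theorem isValidFatFilename_spec : Claim_equal_isValidFatFilename := by
  intro filename _ hpre
  unfold Pre_isValidFatFilename pvChecked at hpre
  rw [List.all_eq_true] at hpre
  unfold Spec_isValidFatFilename isValidFatFilename isValidFatFilename_alt
  rw [pvLoopA_base _ 0 0 hpre]
  have hall : ((filename.toList.takeWhile (· ≠ '.'))
      ++ ((filename.toList.dropWhile (· ≠ '.')).drop 1)).all pvAcceptableB = true := by
    rw [List.all_eq_true]
    intro c hc
    exact pvAcceptableB_of_ok (hpre c hc)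
  simp only [hall, Bool.true_and]
  congr 2 <;> first
    | (rw [decide_eq_decide]; omega)
    | (rw [eq_iff_iff]; omega)
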